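-- pv_equiv track=rewrite | github.com/bayezid-hossain/leetcode | 3434-find-the-number-of-distinct-colors-among-the-balls/find-the-number-of-distinct-colors-among-the-balls.py | queryResults
-- ===== SOURCE A (Python) =====
-- from typing import List
--
-- def queryResults(limit: int, queries: List[List[int]]) -> List[int]:
--     colormap={}
--     res=[]
--     indexmap={}
--     for index,color in queries:
--         if not color:
--             res.append(len(colormap))
--             continue
--         if color not in colormap and index not in indexmap:
--             colormap[color]={index}
--             indexmap[index]=color
--         elif color not in colormap and index in indexmap:
--             oldcolor=indexmap[index]
--             indexmap[index]=color
--             colormap[oldcolor].remove(index)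
--             if len(colormap[oldcolor])==0:
--                 colormap.pop(oldcolor)
--             colormap[color]={index}
--         elif color in colormap and index in indexmap:
--             oldcolor = indexmap[index]
--             colormap[oldcolor].remove(index)
--             indexmap[index]=color
--             if len(colormap[oldcolor])==0:
--                 colormap.pop(oldcolor)
--             if color not in colormap:
--                 colormap[color]={index}
--             else:
--                 colormap[color].add(index)
--         elif color in colormap and index not in indexmap:
--             indexmap[index]=color
--             colormap[color].add(index)
--         res.append(len(colormap))
--     return res
-- ===== SOURCE B (Python) =====
-- from typing import List
--
-- def queryResults(limit: int, queries: List[List[int]]) -> List[int]: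
--     n = len(queries)
--     # Pass 1 (backwards): nxt[j] = position of the next recoloring of the same ball, or n.
--     nxt = {}
--     seen = {}
--     for j, q in reversed(list(enumerate(queries))):
--         index, color = q
--         if color:
--             nxt[j] = seen.get(index, n)
--             seen[index] = j
--     # Pass 2 (forward sweep): recoloring j keeps its color alive during [j, nxt[j]);
--     # expire[k] lists the colors whose lifetime ends right before step k.
--     expire = {}
--     cnt = {}
--     res = []
--     for j, q in enumerate(queries):
--         for c in expire.get(j, []):
--             if cnt[c] == 1:
--                 del cnt[c]
--             else:
--                 cnt[c] -= 1
--         index, color = q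
--         if color:
--             cnt[color] = cnt.get(color, 0) + 1
--             expire[nxt[j]] = expire.get(nxt[j], []) + [color]
--         res.append(len(cnt))
--     return res
-- ===== Notes on version B (the rewrite author's own statement) =====
-- stated objective: alternative
-- what changed: B is offline: a backward pass precomputes for every recoloring query the position of the next recoloring of the same ball, then a forward sweep expires each color at that precomputed position, replacing A's online color-to-set-of-indices map and four-way branch; the sweep never consults an index-to-color map.
import Mathlib
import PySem

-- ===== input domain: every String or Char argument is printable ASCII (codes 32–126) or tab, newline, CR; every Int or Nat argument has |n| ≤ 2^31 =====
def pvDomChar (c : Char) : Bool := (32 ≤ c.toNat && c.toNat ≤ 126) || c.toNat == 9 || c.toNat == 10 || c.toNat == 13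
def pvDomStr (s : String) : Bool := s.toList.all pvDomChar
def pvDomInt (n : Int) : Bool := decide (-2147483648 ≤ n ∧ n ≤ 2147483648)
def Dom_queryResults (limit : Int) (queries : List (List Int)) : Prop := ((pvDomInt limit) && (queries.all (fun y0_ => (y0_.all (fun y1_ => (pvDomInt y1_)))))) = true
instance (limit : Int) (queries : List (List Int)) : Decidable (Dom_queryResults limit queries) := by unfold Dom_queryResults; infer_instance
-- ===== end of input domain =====

-- B replaces A's online color→set-of-indices bookkeeping by an OFFLINE two-pass algorithm:
-- a backward pass precomputes, for each recoloring query, the position of the next recoloring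
-- of the same ball; a forward sweep then expires each color at that precomputed position and
-- never consults an index→color map (objective: alternative; same asymptotic cost).

-- ===== PORT A =====
-- One loop iteration of A: state = (colormap, res, indexmap).
-- colormap[oldcolor] / .remove(index) are ported total (getD / discard): on every state A
-- actually reaches, oldcolor is a key of colormap and index is in the set (A never raises there).
def stepA (st : PySem.Dict Int (PySem.Set Int) × List Int × PySem.Dict Int Int) (q : List Int) :
    PySem.Dict Int (PySem.Set Int) × List Int × PySem.Dict Int Int :=
  match q with
  | [index, color] =>
    let colormap := st.1
    let res := st.2.1
    let indexmap := st.2.2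
    if color = 0 then (colormap, res ++ [(colormap.size : Int)], indexmap)
    else if !colormap.contains color && !indexmap.contains index then
      let colormap := colormap.insert color (PySem.Set.ofList [index])
      let indexmap := indexmap.insert index color
      (colormap, res ++ [(colormap.size : Int)], indexmap)
    else if !colormap.contains color && indexmap.contains index then
      let oldcolor := indexmap.getD index 0
      let indexmap := indexmap.insert index color
      let s := PySem.Set.discard (colormap.getD oldcolor PySem.Set.empty) index
      let colormap := colormap.insert oldcolor s
      let colormap := if s.length = 0 then colormap.erase oldcolor else colormap
      let colormap := colormap.insert color (PySem.Set.ofList [index])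
      (colormap, res ++ [(colormap.size : Int)], indexmap)
    else if colormap.contains color && indexmap.contains index then
      let oldcolor := indexmap.getD index 0
      let s := PySem.Set.discard (colormap.getD oldcolor PySem.Set.empty) index
      let colormap := colormap.insert oldcolor s
      let indexmap := indexmap.insert index color
      let colormap := if s.length = 0 then colormap.erase oldcolor else colormap
      let colormap :=
        if colormap.contains color = false then colormap.insert color (PySem.Set.ofList [index])
        else colormap.insert color (PySem.Set.add (colormap.getD color PySem.Set.empty) index)
      (colormap, res ++ [(colormap.size : Int)], indexmap)
    else if colormap.contains color && !indexmap.contains index then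
      let indexmap := indexmap.insert index color
      let colormap := colormap.insert color (PySem.Set.add (colormap.getD color PySem.Set.empty) index)
      (colormap, res ++ [(colormap.size : Int)], indexmap)
    else (colormap, res ++ [(colormap.size : Int)], indexmap)
  | _ => st

def queryResults (limit : Int) (queries : List (List Int)) : List Int :=
  (queries.foldl stepA (PySem.Dict.empty, ([], PySem.Dict.empty))).2.1

-- ===== PORT B =====
-- Pass 1 iteration (runs over reversed(list(enumerate(queries)))): state = (nxt, seen).
def stepN (n : Int) (st : PySem.Dict Int Int × PySem.Dict Int Int) (jq : Int × List Int) :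
    PySem.Dict Int Int × PySem.Dict Int Int :=
  match jq.2 with
  | [index, color] =>
    if color = 0 then st
    else (st.1.insert jq.1 (st.2.getD index n), st.2.insert index jq.1)
  | _ => st

-- Body of pass 2's inner expiration loop.  cnt[c] is ported total (getD): on every state
-- B reaches, c is a key of cnt.
def expire1 (cnt : PySem.Dict Int Int) (c : Int) : PySem.Dict Int Int :=
  if cnt.getD c 0 = 1 then cnt.erase c else cnt.insert c (cnt.getD c 0 - 1)

-- Pass 2 iteration: state = (expire, cnt, res).  nxt[j] is ported total (getD): pass 1 put a
-- key at every position j of a recoloring query.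
def stepS (nxt : PySem.Dict Int Int)
    (st : PySem.Dict Int (List Int) × PySem.Dict Int Int × List Int) (jq : Int × List Int) :
    PySem.Dict Int (List Int) × PySem.Dict Int Int × List Int :=
  let expire := st.1
  let cnt := (expire.getD jq.1 []).foldl expire1 st.2.1
  let res := st.2.2
  match jq.2 with
  | [index, color] =>
    if color = 0 then (expire, cnt, res ++ [(cnt.size : Int)])
    else
      let cnt := cnt.insert color (cnt.getD color 0 + 1)
      let k := nxt.getD jq.1 0
      (expire.insert k (expire.getD k [] ++ [color]), cnt, res ++ [(cnt.size : Int)])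
  | _ => (expire, cnt, res)

def queryResults_alt (limit : Int) (queries : List (List Int)) : List Int :=
  let n : Int := queries.length
  let nxt := ((PySem.List.enumerate queries).reverse.foldl (stepN n)
    (PySem.Dict.empty, PySem.Dict.empty)).1
  ((PySem.List.enumerate queries).foldl (stepS nxt)
    (PySem.Dict.empty, PySem.Dict.empty, [])).2.2

-- ===== PRECONDITION & SPEC =====
-- Pre_ excludes queries whose entries are not 2-element lists: Python's 'index,color = q' raises ValueError there.
def Pre_queryResults (limit : Int) (queries : List (List Int)) : Prop :=
  ∀ q ∈ queries, q.length = 2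
instance (limit : Int) (queries : List (List Int)) : Decidable (Pre_queryResults limit queries) := by
  unfold Pre_queryResults; infer_instance

def pvWitness_queryResults : Int × List (List Int) := (4, [[0, 1], [1, 1], [0, 2], [2, 0], [1, 0]])

def Spec_queryResults (limit : Int) (queries : List (List Int)) (out : List Int) : Prop := out = queryResults_alt limit queries
instance (limit : Int) (queries : List (List Int)) (out : List Int) : Decidable (Spec_queryResults limit queries out) := by unfold Spec_queryResults; infer_instance

-- ===== CLAIM (what is proved, stated in full; the proofs are below) =====
def Claim_equal_queryResults : Prop := ∀ (limit : Int) (queries : List (List Int)), Dom_queryResults limit queries → Pre_queryResults limit queries → Spec_queryResults limit queries (queryResults limit queries)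

-- ===== LEMMAS AND PROOFS =====

-- ---- Part I: A is simulated by an ONLINE count-based mediator stepO (proof-side only). ----
-- stepO is not a port: it is the intermediate online algorithm (ball = index→color, cnt =
-- color→count) through which A and B are related.  State = (ball, cnt, res).
def stepO (st : PySem.Dict Int Int × PySem.Dict Int Int × List Int) (q : List Int) :
    PySem.Dict Int Int × PySem.Dict Int Int × List Int :=
  match q with
  | [index, color] =>
    let ball := st.1
    let cnt := st.2.1
    let res := st.2.2
    if color = 0 then (ball, cnt, res ++ [(cnt.size : Int)])
    else
      let cnt :=
        match ball.get? index with
        | some old =>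
          let c := cnt.getD old 0
          if c = 1 then cnt.erase old else cnt.insert old (c - 1)
        | none => cnt
      let ball := ball.insert index color
      let cnt := cnt.insert color (cnt.getD color 0 + 1)
      (ball, cnt, res ++ [(cnt.size : Int)])
  | _ => st

-- PySem.Dict has no erase lemmas; the two facts about erase we need, proved from its definition.
theorem find?_filter_ne {ν : Type} (l : List (Int × ν)) (k k' : Int) (h : k' ≠ k) :
    List.find? (fun p => p.1 == k') (l.filter (fun p => !p.1 == k)) =
      List.find? (fun p => p.1 == k') l := by
  induction l with
  | nil => rfl
  | cons p rest ih =>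
    by_cases hpk : p.1 = k
    · have : (p.1 == k') = false := by simp [hpk, Ne.symm h]
      simp [List.filter_cons, hpk, List.find?_cons, this, ih, h, Ne.symm h]
    · by_cases hpk' : p.1 = k'
      · simp [List.filter_cons, hpk, List.find?_cons, hpk', h, Ne.symm h]
      · simp [List.filter_cons, hpk, List.find?_cons, hpk', ih, h, Ne.symm h]

theorem find?_filter_self {ν : Type} (l : List (Int × ν)) (k : Int) :
    List.find? (fun p => p.1 == k) (l.filter (fun p => !p.1 == k)) = none := by
  refine List.find?_eq_none.2 (fun p hp => ?_)
  have := (List.mem_filter.1 hp).2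
  simpa using this

theorem dict_get?_erase {ν : Type} (d : PySem.Dict Int ν) (k k' : Int) :
    (d.erase k).get? k' = if k' = k then none else d.get? k' := by
  rcases d with ⟨items⟩
  by_cases hk : k' = k
  · simp [PySem.Dict.erase, PySem.Dict.get?, hk, find?_filter_self]
  · simp [PySem.Dict.erase, PySem.Dict.get?, hk, find?_filter_ne items k k' hk]

theorem dict_nodup_keys_erase {ν : Type} (d : PySem.Dict Int ν) (k : Int)
    (h : d.keys.Nodup) : (d.erase k).keys.Nodup := by
  rcases d with ⟨items⟩
  exact List.Nodup.sublist ((List.filter_sublist).map _) h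

theorem size_eq_of_get?_isSome {ν₁ ν₂ : Type} (d1 : PySem.Dict Int ν₁) (d2 : PySem.Dict Int ν₂)
    (h1 : d1.keys.Nodup) (h2 : d2.keys.Nodup)
    (h : ∀ x, (d1.get? x).isSome = (d2.get? x).isSome) : d1.size = d2.size := by
  have hm : ∀ x, x ∈ d1.keys ↔ x ∈ d2.keys := by
    intro x
    rw [← not_iff_not, ← PySem.Dict.get?_eq_none_iff_not_mem_keys,
      ← PySem.Dict.get?_eq_none_iff_not_mem_keys]
    rw [← Option.not_isSome_iff_eq_none, ← Option.not_isSome_iff_eq_none, h x]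
  have hp := (List.perm_ext_iff_of_nodup h1 h2).2 hm
  have hl := hp.length_eq
  simpa [PySem.Dict.keys, PySem.Dict.size] using hl

theorem length_discard_add_one {x : Int} {s : PySem.Set Int} (hn : s.Nodup) (hx : x ∈ s) :
    (PySem.Set.discard s x).length + 1 = s.length := by
  induction s with
  | nil => cases hx
  | cons a t ih =>
    obtain ⟨hna, hnt⟩ := List.nodup_cons.1 hn
    by_cases hax : a = x
    · subst hax
      have hdis : PySem.Set.discard (a :: t) a = t := by
        simp only [PySem.Set.discard, List.filter_cons, BEq.rfl, Bool.not_true, if_false]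
        refine List.filter_eq_self.2 (fun y hy => ?_)
        simpa using fun (hya : y = a) => hna (hya ▸ hy)
      simp [hdis]
    · have hxt : x ∈ t := by
        rcases List.mem_cons.1 hx with h | h
        · exact absurd h.symm hax
        · exact h
      have hdis : PySem.Set.discard (a :: t) x = a :: PySem.Set.discard t x := by
        simp [PySem.Set.discard, List.filter_cons, hax]
      rw [hdis]
      have hih := ih hnt hxt
      simp only [List.length_cons]
      omega

-- The simulation invariant between A's (colormap, indexmap) and the mediator's (ball = indexmap, cnt).
def SimInv (cm : PySem.Dict Int (PySem.Set Int)) (im cnt : PySem.Dict Int Int) : Prop :=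
  cm.keys.Nodup ∧ cnt.keys.Nodup ∧
  (∀ c, cnt.get? c = (cm.get? c).map (fun s => (s.length : Int))) ∧
  (∀ c s, cm.get? c = some s → s.Nodup ∧ s ≠ [] ∧ (∀ i, i ∈ s ↔ im.get? i = some c)) ∧
  (∀ i c, im.get? i = some c → cm.contains c = true)

theorem simInv_size_eq {cm : PySem.Dict Int (PySem.Set Int)} {im cnt : PySem.Dict Int Int}
    (h : SimInv cm im cnt) : cm.size = cnt.size := by
  obtain ⟨h1, h2, h3, _, _⟩ := h
  refine size_eq_of_get?_isSome cm cnt h1 h2 (fun x => ?_)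
  rw [h3 x]; cases cm.get? x <;> simp

theorem branch1_inv (cm : PySem.Dict Int (PySem.Set Int)) (im cnt : PySem.Dict Int Int)
    (index color : Int) (h : SimInv cm im cnt) (hgi : im.get? index = none)
    (hcc : cm.contains color = false) :
    SimInv (cm.insert color (PySem.Set.ofList [index])) (im.insert index color)
      (cnt.insert color (cnt.getD color 0 + 1)) := by
  obtain ⟨hnA, hnB, hmap, hfib, hsurj⟩ := h
  have hgc : cm.get? color = none := (PySem.Dict.get?_eq_none_iff_contains cm color).2 hcc
  have hgcnt : cnt.get? color = none := by rw [hmap color, hgc]; rfl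
  have hgd : cnt.getD color 0 = 0 := by simp [PySem.Dict.getD, hgcnt]
  refine ⟨PySem.Dict.nodup_keys_insert _ _ _ hnA, PySem.Dict.nodup_keys_insert _ _ _ hnB, ?_, ?_, ?_⟩
  · intro c
    rw [PySem.Dict.get?_insert, PySem.Dict.get?_insert]
    by_cases hcol : c = color
    · simp [hcol, hgd, PySem.Set.ofList, PySem.Set.add, PySem.Set.empty]
    · simp [hcol, hmap c]
  · intro c s hs
    rw [PySem.Dict.get?_insert] at hs
    by_cases hcol : c = color
    · rw [if_pos hcol] at hs
      obtain rfl : s = [index] := (Option.some.inj hs).symm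
      refine ⟨by simp, by simp, fun i => ?_⟩
      rw [PySem.Dict.get?_insert]
      constructor
      · intro hi
        have : i = index := by simpa using hi
        simp [this, hcol]
      · intro hi
        by_cases hii : i = index
        · simp [hii]
        · rw [if_neg hii] at hi
          exact absurd (hsurj i c hi) (by rw [hcol, hcc]; simp)
    · rw [if_neg hcol] at hs
      obtain ⟨h1, h2, h3⟩ := hfib c s hs
      refine ⟨h1, h2, fun i => ?_⟩
      rw [PySem.Dict.get?_insert]
      by_cases hii : i = index
      · rw [if_pos hii]
        constructor
        · intro hi
          have := (h3 i).1 hi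
          rw [hii, hgi] at this; cases this
        · intro he
          exact absurd (Option.some.inj he).symm hcol
      · rw [if_neg hii]; exact h3 i
  · intro i c hi
    rw [PySem.Dict.get?_insert] at hi
    rw [PySem.Dict.contains_insert]
    by_cases hii : i = index
    · rw [if_pos hii] at hi
      have : color = c := Option.some.inj hi
      simp [this]
    · rw [if_neg hii] at hi
      simp [hsurj i c hi]

theorem branch4_inv (cm : PySem.Dict Int (PySem.Set Int)) (im cnt : PySem.Dict Int Int)
    (index color : Int) (h : SimInv cm im cnt) (hgi : im.get? index = none)
    (hcc : cm.contains color = true) :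
    SimInv (cm.insert color (PySem.Set.add (cm.getD color PySem.Set.empty) index))
      (im.insert index color) (cnt.insert color (cnt.getD color 0 + 1)) := by
  obtain ⟨hnA, hnB, hmap, hfib, hsurj⟩ := h
  obtain ⟨s0, hg0⟩ : ∃ s0, cm.get? color = some s0 := by
    rw [PySem.Dict.contains_eq_isSome_get?] at hcc
    exact Option.isSome_iff_exists.1 hcc
  obtain ⟨hs0n, hs0ne, hs0f⟩ := hfib color s0 hg0
  have hgd : cm.getD color PySem.Set.empty = s0 := PySem.Dict.getD_of_get?_eq_some _ _ hg0
  have hnotmem : index ∉ s0 := fun hmem => by rw [(hs0f index).1 hmem] at hgi; cases hgi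
  have hadd : PySem.Set.add (cm.getD color PySem.Set.empty) index = s0 ++ [index] := by
    rw [hgd]; exact PySem.Set.add_of_not_mem hnotmem
  have hgdc : cnt.getD color 0 = (s0.length : Int) := by
    have := hmap color; rw [hg0] at this
    exact PySem.Dict.getD_of_get?_eq_some _ _ this
  rw [hadd]
  refine ⟨PySem.Dict.nodup_keys_insert _ _ _ hnA, PySem.Dict.nodup_keys_insert _ _ _ hnB, ?_, ?_, ?_⟩
  · intro c
    rw [PySem.Dict.get?_insert, PySem.Dict.get?_insert]
    by_cases hcol : c = color
    · simp [hcol, hgdc]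
    · simp [hcol, hmap c]
  · intro c s hs
    rw [PySem.Dict.get?_insert] at hs
    by_cases hcol : c = color
    · rw [if_pos hcol] at hs
      obtain rfl : s = s0 ++ [index] := (Option.some.inj hs).symm
      refine ⟨?_, by simp, fun i => ?_⟩
      · refine List.Nodup.append hs0n (List.nodup_singleton _) ?_
        intro a ha hb
        simp only [List.mem_singleton] at hb
        subst hb
        exact hnotmem ha
      rw [PySem.Dict.get?_insert]
      by_cases hii : i = index
      · simp [hii, hcol]
      · rw [if_neg hii]
        simp only [List.mem_append, List.mem_singleton, hii, or_false]
        rw [hs0f i, hcol]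
    · rw [if_neg hcol] at hs
      obtain ⟨h1, h2, h3⟩ := hfib c s hs
      refine ⟨h1, h2, fun i => ?_⟩
      rw [PySem.Dict.get?_insert]
      by_cases hii : i = index
      · rw [if_pos hii]
        constructor
        · intro hi
          have := (h3 i).1 hi
          rw [hii, hgi] at this; cases this
        · intro he
          exact absurd (Option.some.inj he).symm hcol
      · rw [if_neg hii]; exact h3 i
  · intro i c hi
    rw [PySem.Dict.get?_insert] at hi
    rw [PySem.Dict.contains_insert]
    by_cases hii : i = index
    · rw [if_pos hii] at hi
      simp [Option.some.inj hi]
    · rw [if_neg hii] at hi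
      simp [hsurj i c hi]

theorem old_ctx (cm : PySem.Dict Int (PySem.Set Int)) (im cnt : PySem.Dict Int Int)
    (index old : Int) (h : SimInv cm im cnt) (hgi : im.get? index = some old) :
    ∃ s_old : PySem.Set Int, cm.get? old = some s_old ∧ s_old.Nodup ∧ s_old ≠ [] ∧
      (∀ i, i ∈ s_old ↔ im.get? i = some old) ∧ index ∈ s_old ∧
      cm.getD old PySem.Set.empty = s_old ∧ cnt.getD old 0 = (s_old.length : Int) := by
  obtain ⟨hnA, hnB, hmap, hfib, hsurj⟩ := h
  have hcont := hsurj index old hgi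
  rw [PySem.Dict.contains_eq_isSome_get?] at hcont
  obtain ⟨s_old, hold⟩ := Option.isSome_iff_exists.1 hcont
  obtain ⟨h1, h2, h3⟩ := hfib old s_old hold
  refine ⟨s_old, hold, h1, h2, h3, (h3 index).2 hgi,
    PySem.Dict.getD_of_get?_eq_some _ _ hold, ?_⟩
  have := hmap old; rw [hold] at this
  exact PySem.Dict.getD_of_get?_eq_some _ _ this

theorem c1_char (cnt : PySem.Dict Int Int) (old : Int) (n : Nat)
    (hn : cnt.getD old 0 = (n : Int)) (x : Int) :
    (if cnt.getD old 0 = 1 then cnt.erase old else cnt.insert old (cnt.getD old 0 - 1)).get? x =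
      if x = old then (if n = 1 then none else some ((n : Int) - 1)) else cnt.get? x := by
  by_cases h1 : n = 1
  · rw [if_pos (by rw [hn, h1]; rfl), dict_get?_erase, if_pos h1]
  · rw [if_neg (by rw [hn]; exact_mod_cast h1), PySem.Dict.get?_insert, if_neg h1, hn]

theorem c1_nodup (cnt : PySem.Dict Int Int) (old : Int) (h : cnt.keys.Nodup) :
    (if cnt.getD old 0 = 1 then cnt.erase old else cnt.insert old (cnt.getD old 0 - 1)).keys.Nodup := by
  split_ifs
  · exact dict_nodup_keys_erase _ _ h
  · exact PySem.Dict.nodup_keys_insert _ _ _ h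

theorem cm2_char (cm : PySem.Dict Int (PySem.Set Int)) (old : Int) (sd : PySem.Set Int) (x : Int) :
    (if sd.length = 0 then (cm.insert old sd).erase old else cm.insert old sd).get? x =
      if x = old then (if sd.length = 0 then none else some sd) else cm.get? x := by
  by_cases h0 : sd.length = 0
  · rw [if_pos h0, dict_get?_erase]
    by_cases hx : x = old
    · rw [if_pos hx, if_pos hx, if_pos h0]
    · rw [if_neg hx, if_neg hx, PySem.Dict.get?_insert, if_neg hx]
  · rw [if_neg h0, PySem.Dict.get?_insert]
    by_cases hx : x = old
    · rw [if_pos hx, if_pos hx, if_neg h0]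
    · rw [if_neg hx, if_neg hx]

theorem cm2_nodup (cm : PySem.Dict Int (PySem.Set Int)) (old : Int) (sd : PySem.Set Int)
    (h : cm.keys.Nodup) :
    (if sd.length = 0 then (cm.insert old sd).erase old else cm.insert old sd).keys.Nodup := by
  split_ifs
  · exact dict_nodup_keys_erase _ _ (PySem.Dict.nodup_keys_insert _ _ _ h)
  · exact PySem.Dict.nodup_keys_insert _ _ _ h

theorem branch2_inv (cm : PySem.Dict Int (PySem.Set Int)) (im cnt : PySem.Dict Int Int)
    (index color old : Int) (h : SimInv cm im cnt) (hgi : im.get? index = some old)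
    (hcc : cm.contains color = false)
    (cmA : PySem.Dict Int (PySem.Set Int)) (cntB : PySem.Dict Int Int)
    (hcmA : cmA = (if (PySem.Set.discard (cm.getD old PySem.Set.empty) index).length = 0 then
        (cm.insert old (PySem.Set.discard (cm.getD old PySem.Set.empty) index)).erase old
      else cm.insert old (PySem.Set.discard (cm.getD old PySem.Set.empty) index)).insert color
        (PySem.Set.ofList [index]))
    (hcntB : cntB = (if cnt.getD old 0 = 1 then cnt.erase old else
        cnt.insert old (cnt.getD old 0 - 1)).insert color
        ((if cnt.getD old 0 = 1 then cnt.erase old else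
          cnt.insert old (cnt.getD old 0 - 1)).getD color 0 + 1)) :
    SimInv cmA (im.insert index color) cntB := by
  obtain ⟨s_old, hold, hsn, hsne, hsf, hmemi, hgdo, hcnto⟩ := old_ctx cm im cnt index old h hgi
  obtain ⟨hnA, hnB, hmap, hfib, hsurj⟩ := h
  have hgc : cm.get? color = none := (PySem.Dict.get?_eq_none_iff_contains cm color).2 hcc
  have hne : old ≠ color := fun he => by rw [← he, hold] at hgc; cases hgc
  have hgcnt : cnt.get? color = none := by rw [hmap color, hgc]; rfl
  set sd := PySem.Set.discard (cm.getD old PySem.Set.empty) index with hsd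
  have hsd' : sd = PySem.Set.discard s_old index := by rw [hsd, hgdo]
  have hlen : sd.length + 1 = s_old.length := by
    rw [hsd']; exact length_discard_add_one hsn hmemi
  have hsdn : sd.Nodup := by rw [hsd']; exact PySem.Set.nodup_discard _ _ hsn
  have hsdm : ∀ i, i ∈ sd ↔ (i ∈ s_old ∧ i ≠ index) := by
    intro i; rw [hsd']; exact PySem.Set.mem_discard _ _ _
  have hc1 := c1_char cnt old s_old.length hcnto
  have hc1gc : (if cnt.getD old 0 = 1 then cnt.erase old else
      cnt.insert old (cnt.getD old 0 - 1)).get? color = none := by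
    rw [hc1 color, if_neg (Ne.symm hne)]; exact hgcnt
  have hc1gd : (if cnt.getD old 0 = 1 then cnt.erase old else
      cnt.insert old (cnt.getD old 0 - 1)).getD color 0 = 0 := by
    rw [PySem.Dict.getD_eq_get?_getD, hc1gc]; rfl
  have hcmA' : ∀ x, cmA.get? x = if x = color then some [index] else
      (if x = old then (if sd.length = 0 then none else some sd) else cm.get? x) := by
    intro x
    rw [hcmA, PySem.Dict.get?_insert]
    by_cases hx : x = color
    · rw [if_pos hx, if_pos hx]; rfl
    · rw [if_neg hx, if_neg hx, cm2_char cm old sd x]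
  have hcntB' : ∀ x, cntB.get? x = if x = color then some 1 else
      (if x = old then (if s_old.length = 1 then none else some ((s_old.length : Int) - 1))
        else cnt.get? x) := by
    intro x
    rw [hcntB, PySem.Dict.get?_insert]
    by_cases hx : x = color
    · rw [if_pos hx, if_pos hx, hc1gd]; norm_num
    · rw [if_neg hx, if_neg hx, hc1 x]
  refine ⟨by rw [hcmA]; exact PySem.Dict.nodup_keys_insert _ _ _ (cm2_nodup _ _ _ hnA),
    by rw [hcntB]; exact PySem.Dict.nodup_keys_insert _ _ _ (c1_nodup _ _ hnB), ?_, ?_, ?_⟩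
  · intro x
    rw [hcntB' x, hcmA' x]
    by_cases hx : x = color
    · simp [hx]
    · rw [if_neg hx, if_neg hx]
      by_cases hxo : x = old
      · rw [if_pos hxo, if_pos hxo]
        by_cases h0 : sd.length = 0
        · rw [if_pos h0, if_pos (by omega)]; rfl
        · rw [if_neg h0, if_neg (by omega)]
          simp only [Option.map_some]
          congr 1
          omega
      · rw [if_neg hxo, if_neg hxo, hmap x]
  · intro c s hs
    rw [hcmA' c] at hs
    by_cases hcolc : c = color
    · rw [if_pos hcolc] at hs
      obtain rfl : s = [index] := (Option.some.inj hs).symm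
      refine ⟨by simp, by simp, fun i => ?_⟩
      rw [PySem.Dict.get?_insert]
      by_cases hii : i = index
      · simp [hii, hcolc]
      · rw [if_neg hii]
        simp only [List.mem_singleton, hii, false_iff]
        intro him
        rw [hcolc] at him
        exact absurd (hsurj i color him) (by rw [hcc]; simp)
    · rw [if_neg hcolc] at hs
      by_cases hco : c = old
      · rw [if_pos hco] at hs
        by_cases h0 : sd.length = 0
        · rw [if_pos h0] at hs; cases hs
        · rw [if_neg h0] at hs
          obtain rfl : s = sd := (Option.some.inj hs).symm
          refine ⟨hsdn, fun he => h0 (by rw [he]; rfl), fun i => ?_⟩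
          rw [PySem.Dict.get?_insert]
          by_cases hii : i = index
          · rw [if_pos hii]
            constructor
            · intro hmem; exact absurd hii ((hsdm i).1 hmem).2
            · intro he
              rw [hco] at he
              exact absurd (Option.some.inj he).symm hne
          · rw [if_neg hii]
            rw [hsdm i, hsf i, hco]
            constructor
            · exact fun ⟨ha, _⟩ => ha
            · exact fun ha => ⟨ha, hii⟩
      · rw [if_neg hco] at hs
        obtain ⟨h1, h2, h3⟩ := hfib c s hs
        refine ⟨h1, h2, fun i => ?_⟩
        rw [PySem.Dict.get?_insert]
        by_cases hii : i = index
        · rw [if_pos hii]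
          constructor
          · intro hmem
            have := (h3 i).1 hmem
            rw [hii, hgi] at this
            exact absurd (Option.some.inj this).symm hco
          · intro he
            exact absurd (Option.some.inj he).symm hcolc
        · rw [if_neg hii]; exact h3 i
  · intro i c hi
    rw [PySem.Dict.get?_insert] at hi
    rw [PySem.Dict.contains_eq_isSome_get?, hcmA' c]
    by_cases hii : i = index
    · rw [if_pos hii] at hi
      rw [if_pos (Option.some.inj hi).symm]
      rfl
    · rw [if_neg hii] at hi
      by_cases hcolc : c = color
      · rw [if_pos hcolc]; rfl
      · rw [if_neg hcolc]
        by_cases hco : c = old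
        · rw [if_pos hco]
          have hmem : i ∈ sd := (hsdm i).2 ⟨(hsf i).2 (hco ▸ hi), hii⟩
          rw [if_neg (by
            intro h0
            rw [List.length_eq_zero_iff] at h0
            rw [h0] at hmem
            cases hmem)]
          rfl
        · rw [if_neg hco]
          have := hsurj i c hi
          rw [PySem.Dict.contains_eq_isSome_get?] at this
          exact this

theorem branch3_inv (cm : PySem.Dict Int (PySem.Set Int)) (im cnt : PySem.Dict Int Int)
    (index color old : Int) (h : SimInv cm im cnt) (hgi : im.get? index = some old)
    (hcc : cm.contains color = true)
    (cmA : PySem.Dict Int (PySem.Set Int)) (cntB : PySem.Dict Int Int)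
    (hcmA : cmA =
      (if (if (PySem.Set.discard (cm.getD old PySem.Set.empty) index).length = 0 then
            (cm.insert old (PySem.Set.discard (cm.getD old PySem.Set.empty) index)).erase old
          else cm.insert old (PySem.Set.discard (cm.getD old PySem.Set.empty) index)).contains
            color = false then
        (if (PySem.Set.discard (cm.getD old PySem.Set.empty) index).length = 0 then
            (cm.insert old (PySem.Set.discard (cm.getD old PySem.Set.empty) index)).erase old
          else cm.insert old (PySem.Set.discard (cm.getD old PySem.Set.empty) index)).insert color
          (PySem.Set.ofList [index])
      else
        (if (PySem.Set.discard (cm.getD old PySem.Set.empty) index).length = 0 then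
            (cm.insert old (PySem.Set.discard (cm.getD old PySem.Set.empty) index)).erase old
          else cm.insert old (PySem.Set.discard (cm.getD old PySem.Set.empty) index)).insert color
          (PySem.Set.add
            ((if (PySem.Set.discard (cm.getD old PySem.Set.empty) index).length = 0 then
                (cm.insert old (PySem.Set.discard (cm.getD old PySem.Set.empty) index)).erase old
              else cm.insert old (PySem.Set.discard (cm.getD old PySem.Set.empty) index)).getD color
              PySem.Set.empty) index)))
    (hcntB : cntB = (if cnt.getD old 0 = 1 then cnt.erase old else
        cnt.insert old (cnt.getD old 0 - 1)).insert color
        ((if cnt.getD old 0 = 1 then cnt.erase old else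
          cnt.insert old (cnt.getD old 0 - 1)).getD color 0 + 1)) :
    SimInv cmA (im.insert index color) cntB := by
  obtain ⟨s_old, hold, hsn, hsne, hsf, hmemi, hgdo, hcnto⟩ := old_ctx cm im cnt index old h hgi
  obtain ⟨hnA, hnB, hmap, hfib, hsurj⟩ := h
  set sd := PySem.Set.discard (cm.getD old PySem.Set.empty) index with hsd
  set cm2 := if sd.length = 0 then (cm.insert old sd).erase old else cm.insert old sd with hcm2
  set c1 := if cnt.getD old 0 = 1 then cnt.erase old else cnt.insert old (cnt.getD old 0 - 1)
    with hc1def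
  have hsd' : sd = PySem.Set.discard s_old index := by rw [hsd, hgdo]
  have hlen : sd.length + 1 = s_old.length := by
    rw [hsd']; exact length_discard_add_one hsn hmemi
  have hsdn : sd.Nodup := by rw [hsd']; exact PySem.Set.nodup_discard _ _ hsn
  have hsdm : ∀ i, i ∈ sd ↔ (i ∈ s_old ∧ i ≠ index) := by
    intro i; rw [hsd']; exact PySem.Set.mem_discard _ _ _
  have hinotsd : index ∉ sd := fun hm => ((hsdm index).1 hm).2 rfl
  have hcm2' : ∀ x, cm2.get? x =
      if x = old then (if sd.length = 0 then none else some sd) else cm.get? x :=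
    cm2_char cm old sd
  have hc1' : ∀ x, c1.get? x =
      if x = old then (if s_old.length = 1 then none else some ((s_old.length : Int) - 1))
      else cnt.get? x := c1_char cnt old s_old.length hcnto
  have hcm2n : cm2.keys.Nodup := cm2_nodup cm old sd hnA
  have hc1n : c1.keys.Nodup := c1_nodup cnt old hnB
  have hfinish : ∀ (t : PySem.Set Int),
      cmA = cm2.insert color t → cntB = c1.insert color ((t.length : Int)) →
      t.Nodup → t ≠ [] →
      (∀ i, i ∈ t ↔ (i = index ∨ (i ≠ index ∧ im.get? i = some color))) →
      SimInv cmA (im.insert index color) cntB := by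
    intro t hAt hBt htn htne htf
    refine ⟨by rw [hAt]; exact PySem.Dict.nodup_keys_insert _ _ _ hcm2n,
      by rw [hBt]; exact PySem.Dict.nodup_keys_insert _ _ _ hc1n, ?_, ?_, ?_⟩
    · intro x
      rw [hAt, hBt, PySem.Dict.get?_insert, PySem.Dict.get?_insert]
      by_cases hx : x = color
      · rw [if_pos hx, if_pos hx]; rfl
      · rw [if_neg hx, if_neg hx, hcm2' x, hc1' x]
        by_cases hxo : x = old
        · rw [if_pos hxo, if_pos hxo]
          by_cases h0 : sd.length = 0
          · rw [if_pos h0, if_pos (by omega)]; rfl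
          · rw [if_neg h0, if_neg (by omega)]
            simp only [Option.map_some]
            congr 1
            omega
        · rw [if_neg hxo, if_neg hxo, hmap x]
    · intro c s hs
      rw [hAt, PySem.Dict.get?_insert] at hs
      by_cases hcolc : c = color
      · rw [if_pos hcolc] at hs
        obtain rfl : s = t := (Option.some.inj hs).symm
        refine ⟨htn, htne, fun i => ?_⟩
        rw [PySem.Dict.get?_insert, htf i]
        by_cases hii : i = index
        · simp [hii, hcolc]
        · rw [if_neg hii, hcolc]
          simp [hii]
      · rw [if_neg hcolc, hcm2' c] at hs
        by_cases hco : c = old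
        · rw [if_pos hco] at hs
          by_cases h0 : sd.length = 0
          · rw [if_pos h0] at hs; cases hs
          · rw [if_neg h0] at hs
            obtain rfl : s = sd := (Option.some.inj hs).symm
            refine ⟨hsdn, fun he => h0 (by rw [he]; rfl), fun i => ?_⟩
            rw [PySem.Dict.get?_insert]
            by_cases hii : i = index
            · rw [if_pos hii]
              constructor
              · intro hmem; exact absurd hii ((hsdm i).1 hmem).2
              · intro he
                exact absurd (Option.some.inj he).symm hcolc
            · rw [if_neg hii]
              rw [hsdm i, hsf i, hco]
              constructor
              · exact fun ⟨ha, _⟩ => ha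
              · exact fun ha => ⟨ha, hii⟩
        · rw [if_neg hco] at hs
          obtain ⟨h1, h2, h3⟩ := hfib c s hs
          refine ⟨h1, h2, fun i => ?_⟩
          rw [PySem.Dict.get?_insert]
          by_cases hii : i = index
          · rw [if_pos hii]
            constructor
            · intro hmem
              have := (h3 i).1 hmem
              rw [hii, hgi] at this
              exact absurd (Option.some.inj this).symm hco
            · intro he
              exact absurd (Option.some.inj he).symm hcolc
          · rw [if_neg hii]; exact h3 i
    · intro i c hi
      rw [PySem.Dict.get?_insert] at hi
      rw [PySem.Dict.contains_eq_isSome_get?, hAt, PySem.Dict.get?_insert]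
      by_cases hcolc : c = color
      · rw [if_pos hcolc]; rfl
      · rw [if_neg hcolc, hcm2' c]
        by_cases hii : i = index
        · rw [if_pos hii] at hi
          exact absurd (Option.some.inj hi).symm hcolc
        · rw [if_neg hii] at hi
          by_cases hco : c = old
          · rw [if_pos hco]
            have hmem : i ∈ sd := (hsdm i).2 ⟨(hsf i).2 (hco ▸ hi), hii⟩
            rw [if_neg (by
              intro h0
              rw [List.length_eq_zero_iff] at h0
              rw [h0] at hmem
              cases hmem)]
            rfl
          · rw [if_neg hco]
            have := hsurj i c hi
            rw [PySem.Dict.contains_eq_isSome_get?] at this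
            exact this
  by_cases hco : color = old
  · by_cases h0 : sd.length = 0
    · -- recolor with the same color, index was the only ball of it
      have hsingle : s_old = [index] := by
        have hl1 : s_old.length = 1 := by omega
        obtain ⟨a, ha⟩ := List.length_eq_one_iff.1 hl1
        rw [ha] at hmemi
        simp only [List.mem_singleton] at hmemi
        rw [ha, hmemi]
      have hcm2c : cm2.contains color = false := by
        rw [PySem.Dict.contains_eq_isSome_get?, hcm2' color, if_pos hco, if_pos h0]; rfl
      have hc1c : c1.get? color = none := by
        rw [hc1' color, if_pos hco, if_pos (by omega)]
      have hc1gd : c1.getD color 0 = 0 := by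
        rw [PySem.Dict.getD_eq_get?_getD, hc1c]; rfl
      refine hfinish [index] (by rw [hcmA, if_pos hcm2c]; rfl)
        (by rw [hcntB, hc1gd]; norm_num) (by simp) (by simp) (fun i => ?_)
      constructor
      · intro hm
        simp only [List.mem_singleton] at hm
        exact Or.inl hm
      · intro hm
        rcases hm with hm | ⟨hii, hm⟩
        · simp [hm]
        · rw [hco] at hm
          have := (hsf i).2 hm
          rw [hsingle] at this
          exact this
    · -- recolor with the same color, other balls keep it
      have hcm2c : cm2.contains color = true := by
        rw [PySem.Dict.contains_eq_isSome_get?, hcm2' color, if_pos hco, if_neg h0]; rfl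
      have hcm2gd : cm2.getD color PySem.Set.empty = sd := by
        refine PySem.Dict.getD_of_get?_eq_some _ _ ?_
        rw [hcm2' color, if_pos hco, if_neg h0]
      have hc1c : c1.get? color = some ((s_old.length : Int) - 1) := by
        rw [hc1' color, if_pos hco, if_neg (by omega)]
      have hc1gd : c1.getD color 0 = (s_old.length : Int) - 1 :=
        PySem.Dict.getD_of_get?_eq_some _ _ hc1c
      refine hfinish (sd ++ [index])
        (by rw [hcmA, if_neg (by rw [hcm2c]; simp), hcm2gd,
              PySem.Set.add_of_not_mem hinotsd])
        (by rw [hcntB, hc1gd]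
            congr 1
            simp only [List.length_append, List.length_singleton]
            push_cast
            omega)
        (by refine List.Nodup.append hsdn (List.nodup_singleton _) ?_
            intro a ha hb
            simp only [List.mem_singleton] at hb
            subst hb
            exact hinotsd ha)
        (by simp) (fun i => ?_)
      simp only [List.mem_append, List.mem_singleton]
      constructor
      · intro hm
        rcases hm with hm | hm
        · obtain ⟨hms, hii⟩ := (hsdm i).1 hm
          exact Or.inr ⟨hii, by rw [hco]; exact (hsf i).1 hms⟩
        · exact Or.inl hm
      · intro hm
        rcases hm with hm | ⟨hii, hm⟩
        · exact Or.inr hm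
        · rw [hco] at hm
          exact Or.inl ((hsdm i).2 ⟨(hsf i).2 hm, hii⟩)
  · -- genuine recolor to another existing color
    obtain ⟨s_col, hgcol⟩ : ∃ s, cm.get? color = some s := by
      rw [PySem.Dict.contains_eq_isSome_get?] at hcc
      exact Option.isSome_iff_exists.1 hcc
    obtain ⟨hcn, hcne, hcf⟩ := hfib color s_col hgcol
    have hinotcol : index ∉ s_col := fun hm => by
      have := (hcf index).1 hm
      rw [hgi] at this
      exact hco (Option.some.inj this).symm
    have hcm2gcol : cm2.get? color = some s_col := by
      rw [hcm2' color, if_neg hco]; exact hgcol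
    have hcm2c : cm2.contains color = true := by
      rw [PySem.Dict.contains_eq_isSome_get?, hcm2gcol]; rfl
    have hcm2gd : cm2.getD color PySem.Set.empty = s_col :=
      PySem.Dict.getD_of_get?_eq_some _ _ hcm2gcol
    have hc1c : c1.get? color = some ((s_col.length : Int)) := by
      rw [hc1' color, if_neg hco]
      rw [hmap color, hgcol]
      rfl
    have hc1gd : c1.getD color 0 = (s_col.length : Int) :=
      PySem.Dict.getD_of_get?_eq_some _ _ hc1c
    refine hfinish (s_col ++ [index])
      (by rw [hcmA, if_neg (by rw [hcm2c]; simp), hcm2gd,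
            PySem.Set.add_of_not_mem hinotcol])
      (by rw [hcntB, hc1gd]
          congr 1
          simp only [List.length_append, List.length_singleton]
          push_cast
          ring)
      (by refine List.Nodup.append hcn (List.nodup_singleton _) ?_
          intro a ha hb
          simp only [List.mem_singleton] at hb
          subst hb
          exact hinotcol ha)
      (by simp) (fun i => ?_)
    simp only [List.mem_append, List.mem_singleton]
    constructor
    · intro hm
      rcases hm with hm | hm
      · have := (hcf i).1 hm
        refine Or.inr ⟨fun hii => ?_, this⟩
        rw [hii, hgi] at this
        exact hco (Option.some.inj this).symm
      · exact Or.inl hm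
    · intro hm
      rcases hm with hm | ⟨hii, hm⟩
      · exact Or.inr hm
      · exact Or.inl ((hcf i).2 hm)

theorem step_inv (q : List Int) (cm : PySem.Dict Int (PySem.Set Int)) (im cnt : PySem.Dict Int Int)
    (res : List Int) (h : SimInv cm im cnt) :
    (stepA (cm, res, im) q).2.1 = (stepO (im, cnt, res) q).2.2 ∧
    (stepA (cm, res, im) q).2.2 = (stepO (im, cnt, res) q).1 ∧
    SimInv (stepA (cm, res, im) q).1 (stepO (im, cnt, res) q).1 (stepO (im, cnt, res) q).2.1 := by
  rcases q with _ | ⟨index, q⟩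
  · exact ⟨rfl, rfl, h⟩
  rcases q with _ | ⟨color, q⟩
  · exact ⟨rfl, rfl, h⟩
  rcases q with _ | ⟨z, q⟩
  swap
  · exact ⟨rfl, rfl, h⟩
  by_cases hc0 : color = 0
  · simp only [stepA, stepO, if_pos hc0]
    exact ⟨by rw [simInv_size_eq h], trivial, h⟩
  · cases hgi : im.get? index with
    | none =>
      have hcont : im.contains index = false := by
        rw [PySem.Dict.contains_eq_isSome_get?, hgi]; rfl
      by_cases hcc : cm.contains color = true
      · have hinv' := branch4_inv cm im cnt index color h hgi hcc
        simp only [stepA, stepO, if_neg hc0, hgi, hcont, hcc, Bool.not_true, Bool.not_false,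
          Bool.false_and, Bool.and_false, Bool.true_and, Bool.and_true, if_false, if_true,
          Bool.false_eq_true, Bool.true_eq_false]
        exact ⟨by rw [simInv_size_eq hinv'], trivial, hinv'⟩
      · rw [Bool.not_eq_true] at hcc
        have hinv' := branch1_inv cm im cnt index color h hgi hcc
        simp only [stepA, stepO, if_neg hc0, hgi, hcont, hcc, Bool.not_true, Bool.not_false,
          Bool.false_and, Bool.and_false, Bool.true_and, Bool.and_true, if_false, if_true,
          Bool.false_eq_true, Bool.true_eq_false]
        exact ⟨by rw [simInv_size_eq hinv'], trivial, hinv'⟩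
    | some old =>
      have hcont : im.contains index = true := by
        rw [PySem.Dict.contains_eq_isSome_get?, hgi]; rfl
      have hgdi : im.getD index 0 = old := PySem.Dict.getD_of_get?_eq_some _ _ hgi
      by_cases hcc : cm.contains color = true
      · simp only [stepA, stepO, if_neg hc0, hgi, hcont, hcc, Bool.not_true, Bool.not_false,
          Bool.false_and, Bool.and_false, Bool.true_and, Bool.and_true, if_false, if_true,
          Bool.false_eq_true, Bool.true_eq_false]
        rw [hgdi]
        have hinv' := branch3_inv cm im cnt index color old h hgi hcc _ _ rfl rfl
        exact ⟨by rw [simInv_size_eq hinv'], trivial, hinv'⟩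
      · rw [Bool.not_eq_true] at hcc
        simp only [stepA, stepO, if_neg hc0, hgi, hcont, hcc, Bool.not_true, Bool.not_false,
          Bool.false_and, Bool.and_false, Bool.true_and, Bool.and_true, if_false, if_true,
          Bool.false_eq_true, Bool.true_eq_false]
        rw [hgdi]
        have hinv' := branch2_inv cm im cnt index color old h hgi hcc _ _ rfl rfl
        exact ⟨by rw [simInv_size_eq hinv'], trivial, hinv'⟩

theorem fold_inv (queries : List (List Int)) (cm : PySem.Dict Int (PySem.Set Int))
    (im cnt : PySem.Dict Int Int) (res : List Int) (h : SimInv cm im cnt) :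
    (queries.foldl stepA (cm, res, im)).2.1 = (queries.foldl stepO (im, cnt, res)).2.2 := by
  induction queries generalizing cm im cnt res with
  | nil => rfl
  | cons q rest ih =>
    obtain ⟨hres, him, hinv⟩ := step_inv q cm im cnt res h
    simp only [List.foldl_cons]
    have hA : stepA (cm, res, im) q =
        ((stepA (cm, res, im) q).1, (stepA (cm, res, im) q).2.1, (stepA (cm, res, im) q).2.2) := rfl
    have hB : stepO (im, cnt, res) q =
        ((stepO (im, cnt, res) q).1, (stepO (im, cnt, res) q).2.1, (stepO (im, cnt, res) q).2.2) := rfl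
    rw [hA, hB, hres, him]
    exact ih _ _ _ _ hinv

theorem simInv_empty : SimInv PySem.Dict.empty PySem.Dict.empty PySem.Dict.empty := by
  refine ⟨by simp [PySem.Dict.empty, PySem.Dict.keys], by simp [PySem.Dict.empty, PySem.Dict.keys],
    ?_, ?_, ?_⟩ <;> intros <;> simp_all [PySem.Dict.get?_empty]

-- ---- Part II: the online mediator stepO equals B's offline sweep stepS. ----

-- The matcher of "query pair recolors ball i": p = (j, [i, c]) with c ≠ 0.
def isNZ (i : Int) (p : Int × List Int) : Bool :=
  match p.2 with
  | [i', c] => i' == i && !(c == 0)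
  | _ => false

-- Position of the first recoloring of ball i in the (enumerated) query suffix l.
def firstNZ (i : Int) (l : List (Int × List Int)) : Option Int :=
  (l.find? (isNZ i)).map Prod.fst

-- Pass 1's fold, as a function of the suffix.
def nxtOf (n : Int) (l : List (Int × List Int)) : PySem.Dict Int Int × PySem.Dict Int Int :=
  l.reverse.foldl (stepN n) (PySem.Dict.empty, PySem.Dict.empty)

theorem nxtOf_cons (n : Int) (p : Int × List Int) (l : List (Int × List Int)) :
    nxtOf n (p :: l) = stepN n (nxtOf n l) p := by
  simp [nxtOf, List.foldl_append]

theorem firstNZ_cons (i : Int) (p : Int × List Int) (l : List (Int × List Int)) :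
    firstNZ i (p :: l) = if isNZ i p then some p.1 else firstNZ i l := by
  simp [firstNZ, List.find?_cons]
  split_ifs <;> simp_all

theorem isNZ_shape {i : Int} {p : Int × List Int} (h : isNZ i p = true) :
    ∃ c, p.2 = [i, c] ∧ c ≠ 0 := by
  unfold isNZ at h
  rcases p with ⟨j, q⟩
  rcases q with _ | ⟨a, _ | ⟨b, _ | _⟩⟩ <;> simp_all

theorem firstNZ_mem {i k : Int} {l : List (Int × List Int)} (h : firstNZ i l = some k) :
    ∃ c, (k, [i, c]) ∈ l ∧ c ≠ 0 := by
  unfold firstNZ at h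
  rcases hf : l.find? (isNZ i) with _ | p
  · rw [hf] at h; cases h
  · rw [hf] at h
    obtain rfl : p.1 = k := Option.some.inj h
    obtain ⟨c, hq, hc⟩ := isNZ_shape (List.find?_some hf)
    exact ⟨c, by rw [← hq]; exact List.mem_of_find?_eq_some hf, hc⟩

-- In a list with Nodup positions, the pair at a position is unique.
theorem pair_unique {α : Type} {l : List (Int × α)} (h : (l.map Prod.fst).Nodup)
    {k : Int} {q q' : α} (h1 : (k, q) ∈ l) (h2 : (k, q') ∈ l) : q = q' := by
  induction l with
  | nil => cases h1
  | cons p rest ih =>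
    simp only [List.map_cons, List.nodup_cons] at h
    rcases List.mem_cons.1 h1 with he1 | hm1 <;> rcases List.mem_cons.1 h2 with he2 | hm2
    · rw [← he1] at he2; exact (Prod.ext_iff.1 he2).2.symm
    · exact absurd (List.mem_map.2 ⟨_, hm2, by rw [← he1]⟩) h.1
    · exact absurd (List.mem_map.2 ⟨_, hm1, by rw [← he2]⟩) h.1
    · exact ih h.2 hm1 hm2

-- Pass 1 characterization, seen component: seen.get? i = first recoloring position of i.
theorem seen_char (n : Int) (l : List (Int × List Int)) (i : Int) :
    (nxtOf n l).2.get? i = firstNZ i l := by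
  induction l with
  | nil => simp [nxtOf, firstNZ, PySem.Dict.get?_empty]
  | cons p rest ih =>
    rw [nxtOf_cons, firstNZ_cons]
    rcases p with ⟨j, q⟩
    rcases q with _ | ⟨a, _ | ⟨b, _ | _⟩⟩ <;>
      simp only [stepN, isNZ] <;> try simpa using ih
    by_cases hb : b = 0
    · simpa [hb] using ih
    · simp only [if_neg hb]
      rw [PySem.Dict.get?_insert]
      by_cases hia : i = a
      · simp [hia, hb]
      · simp only [if_neg hia]
        have : (a == i && !(b == 0)) = false := by simp [hia, Ne.symm hia]
        simpa [this] using ih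

-- Pass 1 characterization, nxt component: at each recoloring position j,
-- nxt[j] = first recoloring position of the same ball in the rest of the list (default n).
theorem nxt_char (n : Int) (l : List (Int × List Int)) (hnd : (l.map Prod.fst).Nodup) :
    ∀ l1 j i c l2, l = l1 ++ (j, [i, c]) :: l2 → c ≠ 0 →
      (nxtOf n l).1.get? j = some ((firstNZ i l2).getD n) := by
  induction l with
  | nil => intro l1 j i c l2 he; cases l1 <;> simp at he
  | cons p rest ih =>
    intro l1 j i c l2 he hc
    rcases l1 with _ | ⟨x, l1'⟩
    · simp only [List.nil_append, List.cons.injEq] at he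
      obtain ⟨hp, hrest⟩ := he
      subst hrest
      rw [hp, nxtOf_cons]
      simp only [stepN, if_neg hc]
      rw [PySem.Dict.get?_insert_self]
      rw [PySem.Dict.getD_eq_get?_getD, seen_char]
    · simp only [List.cons_append, List.cons.injEq] at he
      obtain ⟨hpx, hrest⟩ := he
      have hndr : (rest.map Prod.fst).Nodup := by
        simp only [List.map_cons, List.nodup_cons] at hnd; exact hnd.2
      have hjr : j ∈ rest.map Prod.fst := by
        rw [hrest]; simp
      have hjp : p.1 ≠ j := by
        simp only [List.map_cons, List.nodup_cons] at hnd
        intro hpe; exact hnd.1 (hpe ▸ hjr)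
      rw [nxtOf_cons]
      have hih := ih hndr l1' j i c l2 hrest hc
      rcases p with ⟨j0, q0⟩
      rcases q0 with _ | ⟨a, _ | ⟨b, _ | _⟩⟩ <;> simp only [stepN] <;> try exact hih
      by_cases hb : b = 0
      · simpa [hb] using hih
      · simp only [if_neg hb]
        rw [PySem.Dict.get?_insert_of_ne _ _ (Ne.symm hjp)]
        exact hih

-- The expire-slot coupling: what expire must hold at each still-unprocessed position,
-- given the online ball map.
def slot (ball : PySem.Dict Int Int) (l : List (Int × List Int)) (j : Int) (q : List Int) :
    List Int :=
  match q with
  | [i, c] => if c ≠ 0 ∧ firstNZ i l = some j then (ball.get? i).toList else []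
  | _ => []

theorem slot_pair (ball : PySem.Dict Int Int) (l : List (Int × List Int)) (j i c : Int) :
    slot ball l j [i, c]
      = if c ≠ 0 ∧ firstNZ i l = some j then (ball.get? i).toList else [] := rfl

def ExpInv (l : List (Int × List Int)) (ball : PySem.Dict Int Int)
    (expire : PySem.Dict Int (List Int)) : Prop :=
  ∀ j q, (j, q) ∈ l → expire.getD j [] = slot ball l j q

-- The sweep equivalence: from coupled states, the online and offline folds produce the same res.
theorem sweep_eq (n : Int) (nxt : PySem.Dict Int Int) (l : List (Int × List Int))
    (ball cnt : PySem.Dict Int Int) (res : List Int) (expire : PySem.Dict Int (List Int))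
    (hlen : ∀ p ∈ l, (p.2 : List Int).length = 2)
    (hnd : (l.map Prod.fst).Nodup)
    (hbd : ∀ k ∈ l.map Prod.fst, k < n)
    (hnxt : ∀ l1 j i c l2, l = l1 ++ (j, [i, c]) :: l2 → c ≠ 0 →
      nxt.get? j = some ((firstNZ i l2).getD n))
    (hexp : ExpInv l ball expire) :
    (l.foldl (fun st p => stepO st p.2) (ball, cnt, res)).2.2
      = (l.foldl (stepS nxt) (expire, cnt, res)).2.2 := by
  induction l generalizing ball cnt res expire with
  | nil => rfl
  | cons p rest ih =>
    obtain ⟨j, q⟩ := p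
    have hq2 : q.length = 2 := hlen (j, q) (by simp)
    rcases q with _ | ⟨i, _ | ⟨c, _ | _⟩⟩ <;> simp at hq2
    have hndr : (rest.map Prod.fst).Nodup := by
      simp only [List.map_cons, List.nodup_cons] at hnd; exact hnd.2
    have hjnr : j ∉ rest.map Prod.fst := by
      simp only [List.map_cons, List.nodup_cons] at hnd; exact hnd.1
    have hbdr : ∀ k ∈ rest.map Prod.fst, k < n := fun k hk => hbd k (by simp [hk])
    have hnxtr : ∀ l1 j' i' c' l2, rest = l1 ++ (j', [i', c']) :: l2 → c' ≠ 0 →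
        nxt.get? j' = some ((firstNZ i' l2).getD n) := by
      intro l1 j' i' c' l2 he hc'
      exact hnxt ((j, [i, c]) :: l1) j' i' c' l2 (by rw [he]; rfl) hc'
    have hlenr : ∀ p ∈ rest, (p.2 : List Int).length = 2 := fun p hp => hlen p (by simp [hp])
    have hslot := hexp j [i, c] (by simp)
    rw [slot_pair] at hslot
    by_cases hc : c = 0
    · -- no recoloring: both sides append the current count size
      subst hc
      have hslot0 : expire.getD j [] = [] := by
        rw [hslot, if_neg (by rintro ⟨h0, _⟩; exact h0 rfl)]
      simp only [List.foldl_cons]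
      have hO : stepO (ball, cnt, res) [i, 0] = (ball, cnt, res ++ [(cnt.size : Int)]) := by
        simp [stepO]
      have hS : stepS nxt (expire, cnt, res) (j, [i, 0])
          = (expire, cnt, res ++ [(cnt.size : Int)]) := by
        simp [stepS, hslot0]
      rw [hO, hS]
      refine ih _ _ _ _ hlenr hndr hbdr hnxtr ?_
      intro j' q' hm
      have hfz : ∀ i', firstNZ i' ((j, [i, 0]) :: rest) = firstNZ i' rest := by
        intro i'
        rw [firstNZ_cons, if_neg (by simp [isNZ])]
      have hold := hexp j' q' (by simp [hm])
      rw [hold]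
      rcases q' with _ | ⟨i', _ | ⟨c', _ | _⟩⟩ <;> try rfl
      rw [slot_pair, slot_pair, hfz i']
    · -- recoloring: expire slot at j is exactly the online removal
      have hfz : firstNZ i ((j, [i, c]) :: rest) = some j := by
        rw [firstNZ_cons, if_pos (by simp [isNZ, hc])]
      have hslot' : expire.getD j [] = (ball.get? i).toList := by
        rw [hslot, if_pos ⟨hc, hfz⟩]
      have hk : nxt.get? j = some ((firstNZ i rest).getD n) :=
        hnxt [] j i c rest rfl hc
      have hkD : nxt.getD j 0 = (firstNZ i rest).getD n :=
        PySem.Dict.getD_of_get?_eq_some _ _ hk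
      -- the expired-fold equals the online decrement
      have hcnt1 : (expire.getD j []).foldl expire1 cnt =
          (match ball.get? i with
           | some old => if cnt.getD old 0 = 1 then cnt.erase old
               else cnt.insert old (cnt.getD old 0 - 1)
           | none => cnt) := by
        rw [hslot']
        cases ball.get? i <;> simp [expire1]
      set cnt1 := (match ball.get? i with
           | some old => if cnt.getD old 0 = 1 then cnt.erase old
               else cnt.insert old (cnt.getD old 0 - 1)
           | none => cnt) with hcnt1def
      set k := (firstNZ i rest).getD n with hkdef
      -- no position of rest carrying a query other than a recoloring of ball i can be k
      have hknot : ∀ j' q', (j', q') ∈ rest → (∀ c'', q' ≠ [i, c'']) → j' ≠ k := by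
        intro j' q' hm hqne hjk
        have hj'bd : j' < n := hbdr j' (List.mem_map.2 ⟨(j', q'), hm, rfl⟩)
        rcases hfk : firstNZ i rest with _ | m
        · rw [hkdef, hfk] at hjk; simp at hjk; omega
        · rw [hkdef, hfk] at hjk
          simp only [Option.getD_some] at hjk
          obtain ⟨c'', hmem, _⟩ := firstNZ_mem hfk
          exact hqne c'' (pair_unique hndr hm (by rw [← hjk] at hmem; exact hmem))
      simp only [List.foldl_cons]
      have hO : stepO (ball, cnt, res) [i, c] =
          (ball.insert i c, cnt1.insert c (cnt1.getD c 0 + 1),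
            res ++ [((cnt1.insert c (cnt1.getD c 0 + 1)).size : Int)]) := by
        simp only [stepO, if_neg hc, hcnt1def]
      have hS : stepS nxt (expire, cnt, res) (j, [i, c]) =
          (expire.insert k (expire.getD k [] ++ [c]), cnt1.insert c (cnt1.getD c 0 + 1),
            res ++ [((cnt1.insert c (cnt1.getD c 0 + 1)).size : Int)]) := by
        simp only [stepS, if_neg hc, hcnt1, hkD, hkdef]
      rw [hO, hS]
      refine ih _ _ _ _ hlenr hndr hbdr hnxtr ?_
      -- re-establish the expire coupling for the rest of the sweep
      intro j' q' hm
      have hget : (expire.insert k (expire.getD k [] ++ [c])).getD j' []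
          = if j' = k then expire.getD k [] ++ [c] else expire.getD j' [] := by
        rw [PySem.Dict.getD_insert]
      have hold := hexp j' q' (by simp [hm])
      rcases q' with _ | ⟨i', _ | ⟨c', _ | _⟩⟩ <;>
        try (rw [hget, if_neg (hknot j' _ hm (by intro c''; simp)), hold]; rfl)
      -- q' = [i', c']
      have hfz' : firstNZ i' ((j, [i, c]) :: rest)
          = if i = i' then some j else firstNZ i' rest := by
        rw [firstNZ_cons]
        by_cases hii : i = i'
        · rw [if_pos (by simp [isNZ, hii, hc]), if_pos hii]
        · rw [if_neg (by simp [isNZ, hii]), if_neg hii]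
      have hj'j : j' ≠ j := fun he => hjnr (he ▸ List.mem_map.2 ⟨(j', [i', c']), hm, rfl⟩)
      have holdv : expire.getD j' []
          = if c' ≠ 0 ∧ (if i = i' then some j else firstNZ i' rest) = some j'
            then (ball.get? i').toList else [] := by
        rw [hold, slot_pair, hfz']
      rw [hget, slot_pair]
      by_cases hii : i = i'
      · -- same ball as the head recoloring
        subst hii
        have holdval : expire.getD j' [] = [] := by
          rw [holdv, if_neg]
          rintro ⟨_, hfj⟩
          rw [if_pos rfl] at hfj
          exact hj'j (Option.some.inj hfj).symm
        have hball' : (ball.insert i c).get? i = some c := PySem.Dict.get?_insert_self _ _ _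
        by_cases hcase : c' ≠ 0 ∧ firstNZ i rest = some j'
        · have hjk : j' = k := by rw [hkdef, hcase.2]; rfl
          rw [if_pos hjk, if_pos hcase, hball', ← hjk, holdval]
          rfl
        · rw [if_neg ?hne, if_neg hcase, holdval]
          case hne =>
            intro hjk
            rcases hfk : firstNZ i rest with _ | m
            · have hj'bd : j' < n := hbdr j' (List.mem_map.2 ⟨(j', [i, c']), hm, rfl⟩)
              rw [hkdef, hfk] at hjk; simp at hjk; omega
            · rw [hkdef, hfk] at hjk
              simp only [Option.getD_some] at hjk
              obtain ⟨c'', hmem, hc''⟩ := firstNZ_mem hfk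
              have heqq := pair_unique hndr hm (by rw [← hjk] at hmem; exact hmem)
              have : c' = c'' := by simpa using heqq
              exact hcase ⟨this ▸ hc'', by rw [hfk, ← hjk]⟩
      · -- a different ball: slot and value are unchanged
        have hball' : (ball.insert i c).get? i' = ball.get? i' :=
          PySem.Dict.get?_insert_of_ne _ _ (Ne.symm hii)
        have hjk : j' ≠ k := hknot j' _ hm (by
          intro c'' he
          simp only [List.cons.injEq] at he
          exact hii he.1.symm)
        rw [if_neg hii] at holdv
        rw [if_neg hjk, holdv, hball']

-- The ExpInv coupling holds initially (empty ball, empty expire).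
theorem expInv_init (l : List (Int × List Int)) :
    ExpInv l PySem.Dict.empty PySem.Dict.empty := by
  intro j q _
  rw [PySem.Dict.getD_empty]
  rcases q with _ | ⟨i, _ | ⟨c, _ | _⟩⟩ <;> try rfl
  rw [slot_pair, PySem.Dict.get?_empty]
  split_ifs <;> rfl

-- Nodup / bound facts about enumerate.
theorem enum_fst_nodup (qs : List (List Int)) :
    ((PySem.List.enumerate qs).map Prod.fst).Nodup := by
  have hp := PySem.List.pairwise_lt_enumerate qs 0
  exact (List.pairwise_map.2 (hp.imp (fun h => h))).imp (fun h => ne_of_lt h)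

theorem enum_fst_bound (qs : List (List Int)) :
    ∀ k ∈ (PySem.List.enumerate qs).map Prod.fst, k < (qs.length : Int) := by
  intro k hk
  obtain ⟨p, hp, hpk⟩ := List.mem_map.1 hk
  obtain ⟨m, hm, hpe⟩ := (PySem.List.mem_enumerate_iff _ _ _).1 hp
  rw [hpe] at hpk
  simp only at hpk
  omega

theorem enum_snd_mem (qs : List (List Int)) :
    ∀ p ∈ PySem.List.enumerate qs, p.2 ∈ qs := by
  intro p hp
  obtain ⟨m, hm, hpe⟩ := (PySem.List.mem_enumerate_iff _ _ _).1 hp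
  rw [hpe]
  exact List.getElem_mem _

-- ===== VERDICT (by name: the statement is the Claim_ definition above) =====
theorem queryResults_spec : Claim_equal_queryResults := by
  intro limit queries _ hpre
  unfold Spec_queryResults queryResults queryResults_alt
  rw [fold_inv queries _ _ _ _ simInv_empty]
  have hmap : queries.foldl stepO (PySem.Dict.empty, PySem.Dict.empty, ([] : List Int))
      = (PySem.List.enumerate queries).foldl (fun st p => stepO st p.2)
          (PySem.Dict.empty, PySem.Dict.empty, ([] : List Int)) := by
    conv_lhs => rw [← PySem.List.map_snd_enumerate queries 0]
    rw [List.foldl_map]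
  rw [hmap]
  exact sweep_eq (queries.length : Int) _ (PySem.List.enumerate queries) _ _ _ _
    (fun p hp => hpre p.2 (enum_snd_mem queries p hp))
    (enum_fst_nodup queries) (enum_fst_bound queries)
    (nxt_char _ _ (enum_fst_nodup queries)) (expInv_init _)
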